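-- pv_equiv track=rewrite | github.com/maltesIam/cyberdemo | backend/src/generators/gen_siem.py | get_incidents_by_severity
-- ===== SOURCE A (Python) =====
-- from typing import Dict, List, Optional, Set
--
-- def get_incidents_by_severity(incidents: List[Dict]) -> Dict[str, List[Dict]]:
--     """
--     Group incidents by severity level.
--
--     Args:
--         incidents: List of incident dictionaries
--
--     Returns:
--         Dictionary mapping severity levels to lists of incidents
--     """
--     by_severity: Dict[str, List[Dict]] = {
--         "Critical": [],
--         "High": [],
--         "Medium": [],
--         "Low": [],
--     }
--
--     for incident in incidents:
--         severity = incident.get("severity", "Medium")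
--         if severity in by_severity:
--             by_severity[severity].append(incident)
--
--     return by_severity
-- ===== SOURCE B (Python) =====
-- def get_incidents_by_severity(incidents):
--     labels = ("Critical", "High", "Medium", "Low")
--     return {
--         label: [i for i in incidents if i.get("severity", "Medium") == label]
--         for label in labels
--     }
-- ===== Notes on version B (the rewrite author's own statement) =====
-- stated objective: idiomatic
-- what changed: Replaces the single pass with a membership-guarded append into a pre-built dict by a dict comprehension over the four fixed labels, each collecting its incidents with an inner filter scan.
import Mathlib
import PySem

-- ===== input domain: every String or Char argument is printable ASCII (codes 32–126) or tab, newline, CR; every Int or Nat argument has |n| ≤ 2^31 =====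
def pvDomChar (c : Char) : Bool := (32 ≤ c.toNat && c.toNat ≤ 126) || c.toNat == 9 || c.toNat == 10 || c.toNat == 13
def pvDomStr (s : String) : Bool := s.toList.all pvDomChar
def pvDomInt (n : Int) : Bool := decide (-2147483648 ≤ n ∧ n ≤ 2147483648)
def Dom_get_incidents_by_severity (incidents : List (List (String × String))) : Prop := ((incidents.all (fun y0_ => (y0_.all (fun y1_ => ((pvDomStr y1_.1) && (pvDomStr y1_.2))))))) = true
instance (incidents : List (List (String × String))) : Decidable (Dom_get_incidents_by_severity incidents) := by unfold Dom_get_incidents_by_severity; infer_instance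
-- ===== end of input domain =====

-- B groups by a comprehension over the four fixed labels with an inner filter per label,
-- instead of A's single pass appending into a pre-built dict; same values, same order.

-- ===== PORT A =====
-- loop body of A: severity = incident.get("severity", "Medium"); if severity in by_severity: append
def stepA (d : PySem.Dict String (List (List (String × String)))) (incident : List (String × String)) :
    PySem.Dict String (List (List (String × String))) :=
  let severity := (PySem.Dict.mk incident).getD "severity" "Medium"
  if d.contains severity then d.modify severity [] (· ++ [incident]) else d

def get_incidents_by_severity (incidents : List (List (String × String))) : List (String × List (List (String × String))) :=
  let by_severity : PySem.Dict String (List (List (String × String))) :=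
    PySem.Dict.mk [("Critical", []), ("High", []), ("Medium", []), ("Low", [])]
  (incidents.foldl stepA by_severity).items

-- ===== PORT B =====
def get_incidents_by_severity_alt (incidents : List (List (String × String))) : List (String × List (List (String × String))) :=
  ["Critical", "High", "Medium", "Low"].map (fun label =>
    (label, incidents.filter (fun i => (PySem.Dict.mk i).getD "severity" "Medium" == label)))

-- ===== PRECONDITION & SPEC =====
def Spec_get_incidents_by_severity (incidents : List (List (String × String))) (out : List (String × List (List (String × String)))) : Prop := out = get_incidents_by_severity_alt incidents
instance (incidents : List (List (String × String))) (out : List (String × List (List (String × String)))) : Decidable (Spec_get_incidents_by_severity incidents out) := by unfold Spec_get_incidents_by_severity; infer_instance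

-- ===== CLAIM (what is proved, stated in full; the proofs are below) =====
def Claim_equal_get_incidents_by_severity : Prop := ∀ (incidents : List (List (String × String))), Dom_get_incidents_by_severity incidents → Spec_get_incidents_by_severity incidents (get_incidents_by_severity incidents)

-- ===== LEMMAS AND PROOFS =====

-- one step of A's loop on the four-key dict, by cases on the incident's severity
theorem stepA_eq (c h m lo : List (List (String × String))) (i : List (String × String)) :
    stepA (PySem.Dict.mk [("Critical", c), ("High", h), ("Medium", m), ("Low", lo)]) i =
      (if (PySem.Dict.mk i).getD "severity" "Medium" = "Critical" then
        PySem.Dict.mk [("Critical", c ++ [i]), ("High", h), ("Medium", m), ("Low", lo)]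
      else if (PySem.Dict.mk i).getD "severity" "Medium" = "High" then
        PySem.Dict.mk [("Critical", c), ("High", h ++ [i]), ("Medium", m), ("Low", lo)]
      else if (PySem.Dict.mk i).getD "severity" "Medium" = "Medium" then
        PySem.Dict.mk [("Critical", c), ("High", h), ("Medium", m ++ [i]), ("Low", lo)]
      else if (PySem.Dict.mk i).getD "severity" "Medium" = "Low" then
        PySem.Dict.mk [("Critical", c), ("High", h), ("Medium", m), ("Low", lo ++ [i])]
      else PySem.Dict.mk [("Critical", c), ("High", h), ("Medium", m), ("Low", lo)]) := by
  unfold stepA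
  generalize (PySem.Dict.mk i).getD "severity" "Medium" = sev
  by_cases hc : sev = "Critical"
  · simp [hc, PySem.Dict.contains, PySem.Dict.modify, PySem.Dict.getD, PySem.Dict.get?, PySem.Dict.insert]
  · by_cases hh : sev = "High"
    · simp [hh, PySem.Dict.contains, PySem.Dict.modify, PySem.Dict.getD, PySem.Dict.insert,
        PySem.Dict.get?]
    · by_cases hm : sev = "Medium"
      · simp [hm, PySem.Dict.contains, PySem.Dict.modify,
          PySem.Dict.getD, PySem.Dict.get?, PySem.Dict.insert]
      · by_cases hl : sev = "Low"
        · simp [hl, PySem.Dict.contains,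
            PySem.Dict.modify, PySem.Dict.getD, PySem.Dict.get?, PySem.Dict.insert]
        · simp [PySem.Dict.contains, hc, hh, hm, hl, Ne.symm hc, Ne.symm hh, Ne.symm hm, Ne.symm hl]

-- invariant of A's loop: starting from the four-key dict with contents c/h/m/lo, the
-- fold ends with each key's list extended by exactly the incidents filtered to that label
theorem loop_invariant (l : List (List (String × String)))
    (c h m lo : List (List (String × String))) :
    (l.foldl stepA
      (PySem.Dict.mk [("Critical", c), ("High", h), ("Medium", m), ("Low", lo)])).items
    = [("Critical", c ++ l.filter (fun i => (PySem.Dict.mk i).getD "severity" "Medium" == "Critical")),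
       ("High", h ++ l.filter (fun i => (PySem.Dict.mk i).getD "severity" "Medium" == "High")),
       ("Medium", m ++ l.filter (fun i => (PySem.Dict.mk i).getD "severity" "Medium" == "Medium")),
       ("Low", lo ++ l.filter (fun i => (PySem.Dict.mk i).getD "severity" "Medium" == "Low"))] := by
  induction l generalizing c h m lo with
  | nil => simp
  | cons i rest ih =>
    rw [List.foldl_cons, stepA_eq]
    by_cases hc : (PySem.Dict.mk i).getD "severity" "Medium" = "Critical"
    · rw [if_pos hc, ih]
      simp [hc]
    · by_cases hh : (PySem.Dict.mk i).getD "severity" "Medium" = "High"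
      · rw [if_neg hc, if_pos hh, ih]
        simp [hh]
      · by_cases hm : (PySem.Dict.mk i).getD "severity" "Medium" = "Medium"
        · rw [if_neg hc, if_neg hh, if_pos hm, ih]
          simp [hm]
        · by_cases hl : (PySem.Dict.mk i).getD "severity" "Medium" = "Low"
          · rw [if_neg hc, if_neg hh, if_neg hm, if_pos hl, ih]
            simp [hl]
          · rw [if_neg hc, if_neg hh, if_neg hm, if_neg hl, ih]
            simp [hc, hh, hm, hl]

-- ===== VERDICT (by name: the statement is the Claim_ definition above) =====
theorem get_incidents_by_severity_spec : Claim_equal_get_incidents_by_severity := by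
  intro incidents _
  unfold Spec_get_incidents_by_severity get_incidents_by_severity get_incidents_by_severity_alt
  simp only [loop_invariant, List.map, List.nil_append]
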